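-- pv_equiv track=rewrite | github.com/pasandissanayake/kd-rid | compute_measures.py | reshape_list
-- ===== SOURCE A (Python) =====
-- def reshape_list(input_list, n_reps):
--     n_blocks = len(input_list) // n_reps
--
--     reps = []
--     for i in range(n_reps):
--         a = []
--         for j in range(n_blocks):
--             a.extend(input_list[j*n_reps + i])
--
--         reps.append(a)
--     return reps
-- ===== SOURCE B (Python) =====
-- def reshape_list(input_list, n_reps):
--     n_blocks = len(input_list) // n_reps
--     reps = [[] for _ in range(n_reps)]
--     for idx, item in enumerate(input_list[:n_blocks * n_reps]):
--         reps[idx % n_reps].extend(item)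
--     return reps
-- ===== Notes on version B (the rewrite author's own statement) =====
-- stated objective: alternative
-- what changed: A gathers each output row with two nested loops indexing input_list[j*n_reps+i]; B instead makes one distributing pass over input_list[:n_blocks*n_reps] with enumerate, routing each sub-list into bucket idx % n_reps.
-- outside the precondition, e.g. on reshape_list([[1]], -1): A returns [], B raises IndexError
import Mathlib
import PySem

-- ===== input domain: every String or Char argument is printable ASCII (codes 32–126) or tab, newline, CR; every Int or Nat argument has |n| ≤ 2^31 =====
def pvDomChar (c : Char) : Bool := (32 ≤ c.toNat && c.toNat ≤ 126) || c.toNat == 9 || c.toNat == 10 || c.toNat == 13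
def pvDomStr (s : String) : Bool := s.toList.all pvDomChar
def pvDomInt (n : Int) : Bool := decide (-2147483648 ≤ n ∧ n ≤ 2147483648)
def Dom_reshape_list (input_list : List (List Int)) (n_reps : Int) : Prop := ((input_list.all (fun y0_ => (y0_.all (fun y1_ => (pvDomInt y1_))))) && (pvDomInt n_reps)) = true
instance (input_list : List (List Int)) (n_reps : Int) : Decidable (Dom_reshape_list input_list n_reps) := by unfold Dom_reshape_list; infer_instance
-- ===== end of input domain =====

-- B replaces A's two nested gather loops by one distributing pass (enumerate + residue buckets); same cost, different decomposition.


-- ===== PORT A =====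
def reshape_list (input_list : List (List Int)) (n_reps : Int) : List (List Int) :=
  let n_blocks := PySem.Int.floordiv (input_list.length : Int) n_reps
  (PySem.List.pyRange 0 n_reps 1).foldl (fun reps i =>
    reps ++ [(PySem.List.pyRange 0 n_blocks 1).foldl
      (fun a j => a ++ PySem.List.pyGetD input_list (j * n_reps + i) []) []]) []

-- ===== PORT B =====
def reshape_list_alt (input_list : List (List Int)) (n_reps : Int) : List (List Int) :=
  let n_blocks := PySem.Int.floordiv (input_list.length : Int) n_reps
  let reps0 := (PySem.List.pyRange 0 n_reps 1).map (fun _ => ([] : List Int))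
  ((PySem.List.slice input_list none (some (n_blocks * n_reps))).zipIdx).foldl
    (fun reps p =>
      reps.set (PySem.Int.mod (p.2 : Int) n_reps).toNat
        ((reps.getD (PySem.Int.mod (p.2 : Int) n_reps).toNat []) ++ p.1)) reps0

-- ===== PRECONDITION & SPEC =====
-- Pre_ excludes n_reps = 0, where A raises ZeroDivisionError, and negative n_reps with a
-- nonempty list, where A's empty result [] is an accident of range() over a negative bound
-- and B's bucket routing raises IndexError.
def Pre_reshape_list (input_list : List (List Int)) (n_reps : Int) : Prop :=
  0 < n_reps ∨ (input_list = [] ∧ n_reps ≠ 0)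
instance (input_list : List (List Int)) (n_reps : Int) : Decidable (Pre_reshape_list input_list n_reps) := by unfold Pre_reshape_list; infer_instance

def pvWitness_reshape_list : List (List Int) × Int := ([[1, 2], [3], [4], [5, 6]], 2)

def Spec_reshape_list (input_list : List (List Int)) (n_reps : Int) (out : List (List Int)) : Prop := out = reshape_list_alt input_list n_reps
instance (input_list : List (List Int)) (n_reps : Int) (out : List (List Int)) : Decidable (Spec_reshape_list input_list n_reps out) := by unfold Spec_reshape_list; infer_instance

-- ===== CLAIM (what is proved, stated in full; the proofs are below) =====
def Claim_equal_reshape_list : Prop := ∀ (input_list : List (List Int)) (n_reps : Int), Dom_reshape_list input_list n_reps → Pre_reshape_list input_list n_reps → Spec_reshape_list input_list n_reps (reshape_list input_list n_reps)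

-- ===== LEMMAS AND PROOFS =====

-- B's loop body, with n_reps = r already in Nat form.
def pvStep (r : Nat) (reps : List (List Int)) (p : List Int × Nat) : List (List Int) :=
  reps.set (p.2 % r) ((reps.getD (p.2 % r) []) ++ p.1)

theorem pvStep_foldl_length (r : Nat) (zs : List (List Int × Nat)) :
    ∀ (reps : List (List Int)), (zs.foldl (pvStep r) reps).length = reps.length := by
  induction zs with
  | nil => intro reps; rfl
  | cons p zs ih => intro reps; rw [List.foldl_cons, ih]; simp [pvStep]

theorem pvStep_foldl_getD (r : Nat) (zs : List (List Int × Nat)) :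
    ∀ (reps : List (List Int)) (i : Nat), i < reps.length →
    (zs.foldl (pvStep r) reps).getD i [] =
      reps.getD i [] ++ ((zs.filter (fun p => p.2 % r == i)).map Prod.fst).flatten := by
  induction zs with
  | nil => intro reps i _; simp
  | cons p zs ih =>
    intro reps i hi
    rw [List.foldl_cons, List.filter_cons]
    by_cases h : p.2 % r = i
    · have hlen : i < (pvStep r reps p).length := by simpa [pvStep] using hi
      rw [ih _ i hlen]
      have hset : (pvStep r reps p).getD i [] = reps.getD i [] ++ p.1 := by
        unfold pvStep
        rw [h, List.getD_eq_getElem?_getD, List.getElem?_set_self hi]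
        rfl
      rw [hset]
      simp [h, List.append_assoc]
    · have hlen : i < (pvStep r reps p).length := by simpa [pvStep] using hi
      rw [ih _ i hlen]
      have hset : (pvStep r reps p).getD i [] = reps.getD i [] := by
        unfold pvStep
        rw [List.getD_eq_getElem?_getD, List.getElem?_set_ne h, ← List.getD_eq_getElem?_getD]
      rw [hset]
      simp [h]

-- one block of ≤ r consecutive items, indices starting at k*r + t: exactly bucket i's item survives
theorem pvBlk (r i : Nat) (hi : i < r) (F : List (List Int)) :
    ∀ (t k : Nat), t + F.length ≤ r →
    ((F.zipIdx (k * r + t)).filter (fun p => p.2 % r == i)).map Prod.fst =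
      if t ≤ i ∧ i < t + F.length then [F.getD (i - t) []] else [] := by
  induction F with
  | nil =>
    intro t k _
    simp only [List.length_nil]
    rw [if_neg (by omega)]
    rfl
  | cons x F ih =>
    intro t k h
    have ht : t < r := by simp only [List.length_cons] at h; omega
    have hmod : (k * r + t) % r = t := by
      rw [Nat.mul_comm, Nat.mul_add_mod, Nat.mod_eq_of_lt ht]
    rw [List.zipIdx_cons, List.filter_cons]
    have htail := ih (t + 1) k (by simp only [List.length_cons] at h ⊢; omega)
    rw [show k * r + (t + 1) = k * r + t + 1 by omega] at htail
    rw [apply_ite (List.map Prod.fst), List.map_cons, htail]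
    by_cases hti : t = i
    · subst hti
      rw [if_pos (by simp [hmod]), if_neg (by omega),
        if_pos (by simp only [List.length_cons]; omega)]
      simp
    · rw [if_neg (by simp [hmod, hti])]
      by_cases hc : t + 1 ≤ i ∧ i < t + 1 + F.length
      · rw [if_pos hc, if_pos (by simp only [List.length_cons]; omega)]
        rw [show i - t = (i - (t + 1)) + 1 by omega]
        rfl
      · rw [if_neg hc, if_neg (by simp only [List.length_cons]; omega)]

-- b full blocks, indices starting at k*r: bucket i collects the items at positions j*r + i
theorem pvChunks (r i : Nat) (hi : i < r) :
    ∀ (b : Nat) (S : List (List Int)) (k : Nat), S.length = b * r →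
    ((S.zipIdx (k * r)).filter (fun p => p.2 % r == i)).map Prod.fst =
      (List.range b).map (fun j => S.getD (j * r + i) []) := by
  intro b
  induction b with
  | zero =>
    intro S k h
    have : S = [] := List.eq_nil_of_length_eq_zero (by simpa using h)
    subst this
    rfl
  | succ b ih =>
    intro S k h
    have hrle : r ≤ S.length := by rw [h, Nat.succ_mul]; omega
    have hlt : (S.take r).length = r := by rw [List.length_take]; omega
    conv_lhs => rw [← List.take_append_drop r S]
    rw [List.zipIdx_append, List.filter_append, List.map_append, hlt]
    have h1 := pvBlk r i hi (S.take r) 0 k (by rw [hlt]; omega)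
    rw [Nat.add_zero, hlt] at h1
    rw [h1, if_pos (by omega : 0 ≤ i ∧ i < 0 + r)]
    have h2 := ih (S.drop r) (k + 1) (by rw [List.length_drop, h, Nat.succ_mul]; omega)
    rw [show k * r + r = (k + 1) * r by ring, h2]
    rw [List.range_succ_eq_map, List.map_cons, List.map_map, List.singleton_append]
    congr 1
    · rw [Nat.sub_zero, Nat.zero_mul, Nat.zero_add]
      rw [List.getD_eq_getElem?_getD, List.getD_eq_getElem?_getD,
        List.getElem?_take_of_lt hi]
    · apply List.map_congr_left
      intro j _
      simp only [Function.comp, Nat.succ_eq_add_one]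
      rw [List.getD_eq_getElem?_getD, List.getD_eq_getElem?_getD, List.getElem?_drop]
      congr 2
      ring

theorem pvA_char (L : List (List Int)) (r : Nat) :
    reshape_list L (r : Int) =
      (List.range r).map (fun i =>
        ((List.range (L.length / r)).map (fun j => L.getD (j * r + i) [])).flatten) := by
  simp only [reshape_list, PySem.Int.floordiv_natCast]
  rw [PySem.List.foldl_append_singleton_eq_map (f := fun i =>
    (PySem.List.pyRange 0 ((L.length / r : Nat) : Int) 1).foldl
      (fun a j => a ++ PySem.List.pyGetD L (j * (r : Int) + i) []) [])]
  rw [List.nil_append]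
  simp only [PySem.List.pyRange_one, Int.sub_zero, Int.toNat_natCast, List.map_map]
  apply List.map_congr_left
  intro i _
  simp only [Function.comp]
  rw [PySem.List.foldl_append_eq_flatMap, List.nil_append]
  rw [List.flatMap_def, List.map_map]
  congr 1
  apply List.map_congr_left
  intro j _
  simp only [Function.comp]
  have hcast : ((0 : Int) + (j : Int)) * (r : Int) + ((0 : Int) + (i : Int))
      = ((j * r + i : Nat) : Int) := by push_cast; ring
  rw [hcast, PySem.List.pyGetD_natCast]

theorem pvB_char (L : List (List Int)) (r : Nat) :
    reshape_list_alt L (r : Int) =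
      (List.range r).map (fun i =>
        ((List.range (L.length / r)).map (fun j => L.getD (j * r + i) [])).flatten) := by
  have hinit : (PySem.List.pyRange 0 (r : Int) 1).map (fun _ => ([] : List Int))
      = List.replicate r [] := by
    rw [PySem.List.pyRange_one, List.map_map]
    rw [show ((fun _ => ([] : List Int)) ∘ fun k : Nat => (0 : Int) + (k : Int))
      = Function.const Nat ([] : List Int) from rfl]
    rw [List.map_const, List.length_range, Int.sub_zero, Int.toNat_natCast]
  have core : reshape_list_alt L (r : Int) =
      ((L.take (L.length / r * r)).zipIdx).foldl (pvStep r) (List.replicate r []) := by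
    simp only [reshape_list_alt, PySem.Int.floordiv_natCast, PySem.Int.mod_natCast,
      Int.toNat_natCast]
    rw [← Nat.cast_mul, PySem.List.slice_to_natCast, hinit]
    rfl
  rw [core]
  have hlen : (((L.take (L.length / r * r)).zipIdx).foldl (pvStep r)
      (List.replicate r [])).length = r := by
    rw [pvStep_foldl_length]; simp
  apply List.ext_getElem
  · rw [hlen]; simp
  · intro i h1 h2
    have hir : i < r := by rwa [hlen] at h1
    have hgd : ∀ (l : List (List Int)) (hh : i < l.length), l[i] = l.getD i [] := by
      intro l hh
      rw [List.getD_eq_getElem?_getD, List.getElem?_eq_getElem hh]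
      rfl
    rw [hgd _ h1, hgd _ h2]
    rw [pvStep_foldl_getD r _ _ i (by simpa using hir)]
    have hz : (L.take (L.length / r * r)).zipIdx
        = (L.take (L.length / r * r)).zipIdx (0 * r) := by rw [Nat.zero_mul]
    rw [hz, pvChunks r i hir (L.length / r) _ 0
      (by rw [List.length_take]; have := Nat.div_mul_le_self L.length r; omega)]
    rw [List.getD_eq_getElem?_getD, List.getElem?_replicate, if_pos hir]
    simp only [Option.getD_some, List.nil_append]
    rw [List.getD_eq_getElem?_getD, List.getElem?_map, List.getElem?_range hir]
    simp only [Option.map_some, Option.getD_some]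
    congr 1
    apply List.map_congr_left
    intro j hj
    have hj' : j + 1 ≤ L.length / r := List.mem_range.mp hj
    have hidx : j * r + i < L.length / r * r :=
      Nat.lt_of_lt_of_le (by rw [Nat.succ_mul]; omega) (Nat.mul_le_mul_right r hj')
    rw [List.getD_eq_getElem?_getD, List.getD_eq_getElem?_getD,
      List.getElem?_take_of_lt hidx]

theorem pv_empty (n : Int) : reshape_list [] n = reshape_list_alt [] n := by
  simp only [reshape_list, reshape_list_alt]
  rw [PySem.List.foldl_append_singleton_eq_map (f := fun i =>
    (PySem.List.pyRange 0 (PySem.Int.floordiv ((([] : List (List Int)).length : Int)) n) 1).foldl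
      (fun a j => a ++ PySem.List.pyGetD ([] : List (List Int)) (j * n + i) []) [])]
  rw [List.nil_append]
  have hslice : PySem.List.slice ([] : List (List Int)) none
      (some (PySem.Int.floordiv ((([] : List (List Int)).length : Int)) n * n)) = [] := by
    simp [PySem.List.slice]
  rw [hslice]
  simp only [List.zipIdx_nil, List.foldl_nil]
  apply List.map_congr_left
  intro i _
  rw [PySem.List.foldl_append_eq_flatMap, List.nil_append]
  simp [PySem.List.pyGetD, PySem.List.pyGet?]

-- ===== VERDICT (by name: the statement is the Claim_ definition above) =====
theorem reshape_list_spec : Claim_equal_reshape_list := by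
  unfold Claim_equal_reshape_list
  intro L n _ hpre
  unfold Spec_reshape_list
  rcases hpre with hpos | ⟨hL, _⟩
  · obtain ⟨r, rfl⟩ : ∃ r : Nat, n = (r : Int) :=
      ⟨n.toNat, (Int.toNat_of_nonneg (le_of_lt hpos)).symm⟩
    rw [pvA_char, pvB_char L r]
  · subst hL
    exact pv_empty n
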